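-- pv_equiv track=rewrite | github.com/CLIUtils/envmodule_setup | scripts/lmod_env.py | prefixify
-- ===== SOURCE A (Python) =====
-- def intersperse(lst, item):
--     result = [item] * (len(lst) * 2 - 1)
--     result[0::2] = lst
--     return result
--
-- def prefixify(value, prefix=None):
--     '''
--     Converts to a version that uses prefixes, if prefix given. Examples:
--
--     >>> prefixify('one two three ', ' ')
--     'joinPath("one", prefix, "two", prefix, "three", prefix)'
--     >>> prefixify(' ', ' ')
--     'prefix'
--     >>> prefixify('this', ' ')
--     '"this"'
--     '''
--
--     if prefix is None or prefix not in value: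
--         return '"{0}"'.format(value)
--     if prefix == value:
--         return 'prefix'
--     vals = ['"{0}"'.format(v) for v in value.split(prefix)]
--     vals = intersperse(vals, 'prefix')
--     vals = [v for v in vals if v != '""']
--     return 'joinPath({0})'.format(', '.join(vals))
-- ===== SOURCE B (Python) =====
-- def prefixify(value, prefix=None):
--     if prefix is None or prefix not in value:
--         return '"{0}"'.format(value)
--     if prefix == value:
--         return 'prefix'
--     out = []
--     for i, v in enumerate(value.split(prefix)):
--         if i > 0:
--             out.append('prefix')
--         if v:
--             out.append('"{0}"'.format(v))
--     return 'joinPath({0})'.format(', '.join(out))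
-- ===== Notes on version B (the rewrite author's own statement) =====
-- stated objective: simpler
-- what changed: Replaced the three list passes (quote every split part, intersperse the separator token, filter out empty quotes) by a single enumerate loop over the split parts that emits the separator token before each non-first part and the quoted part only when non-empty.
import Mathlib
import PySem

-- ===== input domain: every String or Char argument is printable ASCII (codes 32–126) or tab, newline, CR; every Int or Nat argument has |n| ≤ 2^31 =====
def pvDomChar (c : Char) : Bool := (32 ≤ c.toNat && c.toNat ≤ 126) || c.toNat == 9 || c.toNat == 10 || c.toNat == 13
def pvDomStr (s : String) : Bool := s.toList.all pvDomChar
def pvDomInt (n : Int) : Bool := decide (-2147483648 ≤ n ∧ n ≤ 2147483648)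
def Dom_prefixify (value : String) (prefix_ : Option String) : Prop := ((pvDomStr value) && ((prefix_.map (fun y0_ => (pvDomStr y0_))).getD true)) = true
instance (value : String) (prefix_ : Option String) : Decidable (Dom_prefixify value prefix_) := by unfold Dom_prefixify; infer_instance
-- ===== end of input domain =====

-- B replaces intersperse + quoting pass + filter pass with a single loop over the split parts; objective: simpler.

-- ===== PORT A =====
-- '"{0}"'.format(v)  (string formatting ported via PySem.Str.join, exact on Dom)
def pvQuote (v : String) : String := PySem.Str.join "" ["\"", v, "\""]

-- result = [item] * (len(lst)*2 - 1); result[0::2] = lst; return result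
-- slice assignment ported as an index map over the positions: even index j gets lst[j/2],
-- odd index gets item (exact: [item]*(2n-1) has exactly n even slots, matching len(lst))
def intersperseA (lst : List String) (item : String) : List String :=
  (List.range (2 * lst.length - 1)).map (fun j => if j % 2 == 0 then lst.getD (j / 2) item else item)

def prefixify (value : String) (prefix_ : Option String) : String :=
  match prefix_ with
  | none => pvQuote value
  | some p =>
    if PySem.Str.isIn p value = false then pvQuote value
    else if p = value then "prefix"
    else
      let vals := ((PySem.Str.split? value p).getD []).map pvQuote
      let vals := intersperseA vals "prefix"
      let vals := vals.filter (fun v => v ≠ "\"\"")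
      PySem.Str.join "" ["joinPath(", PySem.Str.join ", " vals, ")"]

-- ===== PORT B =====
def prefixify_alt (value : String) (prefix_ : Option String) : String :=
  match prefix_ with
  | none => pvQuote value
  | some p =>
    if PySem.Str.isIn p value = false then pvQuote value
    else if p = value then "prefix"
    else
      let out := (PySem.List.enumerate ((PySem.Str.split? value p).getD [])).foldl
        (fun acc iv =>
          let acc := if iv.1 > 0 then acc ++ ["prefix"] else acc
          if iv.2 ≠ "" then acc ++ [pvQuote iv.2] else acc) []
      PySem.Str.join "" ["joinPath(", PySem.Str.join ", " out, ")"]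

-- ===== PRECONDITION & SPEC =====
-- Pre_ excludes only an empty prefix string paired with a non-empty value: there str.split raises ValueError (in A and in B alike).
def Pre_prefixify (value : String) (prefix_ : Option String) : Prop :=
  prefix_ = some "" → value = ""
instance (value : String) (prefix_ : Option String) : Decidable (Pre_prefixify value prefix_) := by unfold Pre_prefixify; infer_instance
def pvWitness_prefixify : String × Option String := ("one two three ", some " ")

def Spec_prefixify (value : String) (prefix_ : Option String) (out : String) : Prop := out = prefixify_alt value prefix_
instance (value : String) (prefix_ : Option String) (out : String) : Decidable (Spec_prefixify value prefix_ out) := by unfold Spec_prefixify; infer_instance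

-- ===== CLAIM (what is proved, stated in full; the proofs are below) =====
def Claim_equal_prefixify : Prop := ∀ (value : String) (prefix_ : Option String), Dom_prefixify value prefix_ → Pre_prefixify value prefix_ → Spec_prefixify value prefix_ (prefixify value prefix_)

-- ===== LEMMAS AND PROOFS =====

theorem pvQuote_eq_qq_iff (v : String) : (pvQuote v = "\"\"") ↔ v = "" := by
  constructor
  · intro h
    have h2 : (pvQuote v).toList = ("\"\"" : String).toList := by rw [h]
    simpa [pvQuote, PySem.Str.toList_join, PySem.Chars.join, List.intercalate] using h2
  · intro h; subst h; decide

theorem intersperseA_single (x i : String) : intersperseA [x] i = [x] := by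
  simp [intersperseA, List.range_succ]

theorem intersperseA_cons_cons (x y : String) (t : List String) (i : String) :
    intersperseA (x :: y :: t) i = x :: i :: intersperseA (y :: t) i := by
  simp only [intersperseA, List.length_cons]
  have hr : 2 * (t.length + 1 + 1) - 1 = (2 * (t.length + 1) - 1) + 1 + 1 := by omega
  rw [hr, List.range_succ_eq_map, List.range_succ_eq_map]
  simp [List.map_map, Function.comp]
  intro j hj
  have h1 : j + 1 + 1 = j + 2 := by omega
  have h2 : (j + 2) % 2 = j % 2 := by omega
  have h3 : (j + 2) / 2 = j / 2 + 1 := by omega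
  rw [h1, h2, h3]
  rcases Nat.even_or_odd j with he | ho
  · have : j % 2 = 0 := Nat.even_iff.mp he
    simp [this]
  · have : j % 2 = 1 := Nat.odd_iff.mp ho
    simp [this]

def pvG (iv : Int × String) : List String :=
  (if iv.1 > 0 then ["prefix"] else []) ++ (if iv.2 ≠ "" then [pvQuote iv.2] else [])

theorem tail_flat (rest : List String) (s : Int) (hs : 1 ≤ s) :
    (PySem.List.enumerate rest s).flatMap pvG
      = rest.flatMap (fun v => "prefix" :: (if v ≠ "" then [pvQuote v] else [])) := by
  induction rest generalizing s with
  | nil => simp [PySem.List.enumerate_nil]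
  | cons y t ih =>
    rw [PySem.List.enumerate_cons]
    simp only [List.flatMap_cons, ih (s + 1) (by omega)]
    have : (s > 0) = True := by simp; omega
    simp [pvG, this]

theorem main_lemma (x : String) (rest : List String) :
    (intersperseA ((x :: rest).map pvQuote) "prefix").filter (fun v => v ≠ "\"\"")
      = (if x ≠ "" then [pvQuote x] else [])
        ++ rest.flatMap (fun v => "prefix" :: (if v ≠ "" then [pvQuote v] else [])) := by
  induction rest generalizing x with
  | nil =>
    simp only [List.map_cons, List.map_nil, intersperseA_single, List.flatMap_nil, List.append_nil]
    by_cases hx : x = ""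
    · simp [hx, List.filter, pvQuote_eq_qq_iff]
    · have : pvQuote x ≠ "\"\"" := fun h => hx ((pvQuote_eq_qq_iff x).mp h)
      simp [List.filter, this, hx]
  | cons y t ih =>
    simp only [List.map_cons]
    rw [intersperseA_cons_cons]
    have hpr : (decide (("prefix" : String) ≠ "\"\"")) = true := by decide
    by_cases hx : x = ""
    · have hqx : (decide (pvQuote x ≠ "\"\"")) = false := by
        simp [pvQuote_eq_qq_iff, hx]
      have hrx : (if x ≠ "" then [pvQuote x] else []) = [] := if_neg (by simp [hx])
      simp only [List.filter_cons, hqx, hpr, reduceIte, hrx, List.flatMap_cons,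
        List.nil_append]
      rw [show (pvQuote y :: List.map pvQuote t) = (y :: t).map pvQuote by simp, ih y]
      simp
    · have hqx : (decide (pvQuote x ≠ "\"\"")) = true := by
        simp [pvQuote_eq_qq_iff, hx]
      have hrx : (if x ≠ "" then [pvQuote x] else []) = [pvQuote x] := if_pos hx
      simp only [List.filter_cons, hqx, hpr, reduceIte, hrx, List.flatMap_cons]
      rw [show (pvQuote y :: List.map pvQuote t) = (y :: t).map pvQuote by simp, ih y]
      simp

theorem foldl_body_eq (parts : List String) :
    (PySem.List.enumerate parts).foldl
        (fun acc iv =>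
          let acc := if iv.1 > 0 then acc ++ ["prefix"] else acc
          if iv.2 ≠ "" then acc ++ [pvQuote iv.2] else acc) []
      = (PySem.List.enumerate parts).flatMap pvG := by
  have hbody : (fun (acc : List String) (iv : Int × String) =>
      let acc := if iv.1 > 0 then acc ++ ["prefix"] else acc
      if iv.2 ≠ "" then acc ++ [pvQuote iv.2] else acc)
      = fun acc iv => acc ++ pvG iv := by
    funext acc iv
    simp only [pvG]
    split_ifs <;> simp
  rw [hbody, PySem.List.foldl_append_eq_flatMap]
  simp

-- ===== VERDICT (by name: the statement is the Claim_ definition above) =====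
theorem prefixify_spec : Claim_equal_prefixify := by
  intro value prefix_ _ _
  unfold Spec_prefixify prefixify prefixify_alt
  cases prefix_ with
  | none => rfl
  | some p =>
    dsimp only
    split_ifs with h1 h2
    · rfl
    · rfl
    · cases hps : (PySem.Str.split? value p).getD [] with
      | nil => simp [intersperseA, PySem.List.enumerate_nil]
      | cons x rest =>
        rw [foldl_body_eq, PySem.List.enumerate_cons, List.flatMap_cons, zero_add,
          tail_flat rest 1 (by omega)]
        rw [main_lemma]
        have hg : pvG (0, x) = (if x ≠ "" then [pvQuote x] else []) := by
          simp [pvG]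
        rw [hg]
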